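-- pv_equiv track=rewrite | github.com/Gnbhavi/My_storage_to_remind | VT_codes/Kernel_code.py | correlation_finder
-- ===== SOURCE A (Python) =====
-- def correlation_finder(A, B):
--     C = [0] * len(A)
--     for i in range(len(A)):
--         val = 0
--         j = 0
--         while (j < len(B) and i+j < len(A)):
--             if A[i+j] == B[j]:
--                 val = 1
--                 break
--             j += 1
--         C[i] = val
--     return C
-- ===== SOURCE B (Python) =====
-- def correlation_finder(A, B):
--     # Index A's positions by value once, then scatter matches: for each j,
--     # every occurrence of B[j] at position k in A marks start i = k - j.
--     pos = {}
--     for k, a in enumerate(A):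
--         pos.setdefault(a, []).append(k)
--     C = [0] * len(A)
--     for j, b in enumerate(B):
--         for k in pos.get(b, ()):
--             if k - j >= 0:
--                 C[k - j] = 1
--     return C
-- ===== Notes on version B (the rewrite author's own statement) =====
-- stated objective: faster
-- what changed: B builds a value-to-positions index of A once and scatters each occurrence of B[j] to start k-j, replacing A's per-start inner scan over B.
import Mathlib
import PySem

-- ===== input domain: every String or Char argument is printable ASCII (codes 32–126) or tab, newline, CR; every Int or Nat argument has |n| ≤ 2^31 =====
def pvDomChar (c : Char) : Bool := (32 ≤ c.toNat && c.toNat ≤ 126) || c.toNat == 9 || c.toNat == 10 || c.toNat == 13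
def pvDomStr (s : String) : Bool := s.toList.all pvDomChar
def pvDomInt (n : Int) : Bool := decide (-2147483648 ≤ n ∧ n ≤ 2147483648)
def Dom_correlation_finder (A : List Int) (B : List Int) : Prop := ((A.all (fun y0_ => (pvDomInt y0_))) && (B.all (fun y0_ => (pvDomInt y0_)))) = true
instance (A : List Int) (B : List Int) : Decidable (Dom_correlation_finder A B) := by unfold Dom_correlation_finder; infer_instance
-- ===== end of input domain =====

-- B indexes A's positions by value once and scatters each match occurrence, instead of A's per-start inner scan; same return value.

-- ===== PORT A =====
-- A's inner `while` loop: scans j upward, returns 1 at the first aligned match, 0 when the guard fails.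
def cfWhile (A B : List Int) (i j : Nat) : Int :=
  if j < B.length ∧ i + j < A.length then
    -- both indices are in range under the guard, so getD is Python's exact indexing here
    if A.getD (i + j) 0 = B.getD j 0 then 1
    else cfWhile A B i (j + 1)
  else 0
termination_by B.length - j

def correlation_finder (A : List Int) (B : List Int) : List Int :=
  (List.range A.length).map (fun i => cfWhile A B i 0)

-- ===== PORT B =====
-- `pos`: the value → positions index built from enumerate(A) by setdefault-append
def cfPos (A : List Int) : PySem.Dict Int (List Int) :=
  (PySem.List.enumerate A 0).foldl (fun d p => d.modify p.2 [] (fun l => l ++ [p.1])) PySem.Dict.empty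

def correlation_finder_alt (A : List Int) (B : List Int) : List Int :=
  (PySem.List.enumerate B 0).foldl
    (fun C p =>
      ((cfPos A).getD p.2 []).foldl
        (fun C k => if k - p.1 ≥ 0 then C.set (k - p.1).toNat 1 else C) C)
    (List.replicate A.length 0)

-- ===== PRECONDITION & SPEC =====
def Spec_correlation_finder (A : List Int) (B : List Int) (out : List Int) : Prop := out = correlation_finder_alt A B
instance (A : List Int) (B : List Int) (out : List Int) : Decidable (Spec_correlation_finder A B out) := by unfold Spec_correlation_finder; infer_instance

-- ===== CLAIM (what is proved, stated in full; the proofs are below) =====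
def Claim_equal_correlation_finder : Prop := ∀ (A : List Int) (B : List Int), Dom_correlation_finder A B → Spec_correlation_finder A B (correlation_finder A B)

-- ===== LEMMAS AND PROOFS =====

-- the shared characterisation: out[i] = 1 iff some j aligns a match
def cfSpec (A B : List Int) (i : Nat) : Int :=
  if ∃ j < B.length, i + j < A.length ∧ A.getD (i + j) 0 = B.getD j 0 then 1 else 0

theorem cfWhile_eq_spec (A B : List Int) (i : Nat) : ∀ fuel j, B.length - j ≤ fuel →
    cfWhile A B i j =
      (if ∃ j' < B.length, j ≤ j' ∧ i + j' < A.length ∧ A.getD (i + j') 0 = B.getD j' 0 then 1 else 0) := by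
  intro fuel
  induction fuel with
  | zero =>
    intro j hj
    rw [cfWhile, if_neg (by omega)]
    rw [if_neg]
    rintro ⟨j', hj', hle, _⟩
    omega
  | succ fuel ih =>
    intro j hj
    by_cases hg : j < B.length ∧ i + j < A.length
    · rw [cfWhile, if_pos hg]
      by_cases heq : A.getD (i + j) 0 = B.getD j 0
      · rw [if_pos heq, if_pos ⟨j, hg.1, le_refl j, hg.2, heq⟩]
      · rw [if_neg heq, ih (j + 1) (by omega)]
        apply if_congr _ rfl rfl
        constructor
        · rintro ⟨j', h1, h2, h3⟩; exact ⟨j', h1, by omega, h3⟩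
        · rintro ⟨j', h1, h2, h3, h4⟩
          refine ⟨j', h1, ?_, h3, h4⟩
          by_contra hno
          have hjj : j' = j := by omega
          subst hjj
          exact heq h4
    · rw [cfWhile, if_neg hg, if_neg]
      rintro ⟨j', hj', hle, hlt, _⟩
      omega

theorem portA_spec (A B : List Int) :
    correlation_finder A B = (List.range A.length).map (cfSpec A B) := by
  unfold correlation_finder
  apply List.map_congr_left
  intro i _
  rw [cfWhile_eq_spec A B i B.length 0 (by omega), cfSpec]
  apply if_congr _ rfl rfl
  constructor
  · rintro ⟨j, h1, _, h3, h4⟩; exact ⟨j, h1, h3, h4⟩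
  · rintro ⟨j, h1, h3, h4⟩; exact ⟨j, h1, Nat.zero_le j, h3, h4⟩

-- generic scatter: elementwise description of a fold of `set · 1` writes
def set1 (C : List Int) (i : Nat) : List Int := C.set i 1

theorem foldl_set1_getElem? (W : List Nat) : ∀ (C : List Int) (i : Nat),
    (W.foldl set1 C)[i]? = if i ∈ W ∧ i < C.length then some 1 else C[i]? := by
  induction W with
  | nil => intro C i; simp
  | cons w W ih =>
    intro C i
    rw [List.foldl_cons, ih]
    simp only [set1, List.length_set, List.getElem?_set, List.mem_cons]
    by_cases hl : i < C.length
    · by_cases hm : i ∈ W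
      · simp [hm, hl]
      · by_cases hw : i = w
        · subst hw; simp [hm, hl]
        · simp [hm, hl]
          rw [if_neg (fun h => hw h.symm), if_neg hw]
    · simp [hl]
      intro h
      omega
  
theorem inner_filterMap (jv : Int) : ∀ (L : List Int) (C : List Int),
    L.foldl (fun C k => if k - jv ≥ 0 then C.set (k - jv).toNat 1 else C) C
      = (L.filterMap (fun k => if k - jv ≥ 0 then some (k - jv).toNat else none)).foldl set1 C := by
  intro L
  induction L with
  | nil => intro C; rfl
  | cons k L ih =>
    intro C
    rw [List.foldl_cons, List.filterMap_cons]
    by_cases hk : k - jv ≥ 0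
    · rw [if_pos hk]; simp only [hk, if_pos trivial]; rw [List.foldl_cons, ih]; rfl
    · rw [if_neg hk]; simp only [hk, if_false]; rw [ih]

theorem foldl_flatMap_set1 {α : Type} (g : α → List Nat) : ∀ (L : List α) (C : List Int),
    L.foldl (fun C p => (g p).foldl set1 C) C = (L.flatMap g).foldl set1 C := by
  intro L
  induction L with
  | nil => intro C; rfl
  | cons a L ih => intro C; rw [List.foldl_cons, List.flatMap_cons, List.foldl_append, ih]

theorem pos_getD (A : List Int) (v : Int) :
    (cfPos A).getD v []
      = (((PySem.List.enumerate A 0).map Prod.swap).filter (fun p => p.1 == v)).map (·.2) := by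
  unfold cfPos
  rw [show ((PySem.List.enumerate A 0).foldl (fun d p => d.modify p.2 [] (fun l => l ++ [p.1])) PySem.Dict.empty)
      = (((PySem.List.enumerate A 0).map Prod.swap).foldl (fun d p => d.modify p.1 [] (fun l => l ++ [p.2])) PySem.Dict.empty) from by
    rw [List.foldl_map]
    rfl]
  rw [PySem.Dict.getD_foldl_modify_append]
  simp

theorem mem_pos (A : List Int) (v : Int) (k : Int) :
    k ∈ (cfPos A).getD v [] ↔ ∃ t : Nat, ∃ _ : t < A.length, k = (t : Int) ∧ A[t] = v := by
  rw [pos_getD]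
  simp only [List.mem_map, List.mem_filter, PySem.List.mem_enumerate_iff, beq_iff_eq]
  constructor
  · rintro ⟨q, ⟨⟨r, ⟨tn, ht, rfl⟩, rfl⟩, hv⟩, rfl⟩
    simp only [Prod.swap_prod_mk] at hv ⊢
    exact ⟨tn, ht, by omega, hv⟩
  · rintro ⟨tn, ht, rfl, hv⟩
    exact ⟨(A[tn], (0 : Int) + (tn : Int)), ⟨⟨((0 : Int) + (tn : Int), A[tn]), ⟨tn, ht, rfl⟩, rfl⟩, hv⟩, by omega⟩

-- the flattened write list of port B
def cfW (A B : List Int) : List Nat :=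
  (PySem.List.enumerate B 0).flatMap
    (fun p => ((cfPos A).getD p.2 []).filterMap (fun k => if k - p.1 ≥ 0 then some (k - p.1).toNat else none))

theorem portB_flat (A B : List Int) :
    correlation_finder_alt A B = (cfW A B).foldl set1 (List.replicate A.length 0) := by
  unfold correlation_finder_alt cfW
  rw [← foldl_flatMap_set1]
  have hf : (fun (C : List Int) (p : Int × Int) =>
        ((cfPos A).getD p.2 []).foldl (fun C k => if k - p.1 ≥ 0 then C.set (k - p.1).toNat 1 else C) C)
      = (fun C p => (((cfPos A).getD p.2 []).filterMap (fun k => if k - p.1 ≥ 0 then some (k - p.1).toNat else none)).foldl set1 C) := by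
    funext C p
    exact inner_filterMap p.1 _ C
  rw [hf]

theorem mem_cfW (A B : List Int) (i : Nat) :
    i ∈ cfW A B ↔ ∃ j < B.length, i + j < A.length ∧ A.getD (i + j) 0 = B.getD j 0 := by
  unfold cfW
  simp only [List.mem_flatMap, PySem.List.mem_enumerate_iff, List.mem_filterMap]
  constructor
  · rintro ⟨p, ⟨jn, hj, rfl⟩, k, hk, hif⟩
    rw [mem_pos] at hk
    obtain ⟨tn, ht, rfl, hA⟩ := hk
    simp only at hif
    split at hif
    · next hge =>
      have htn : ((tn : Int) - (0 + (jn : Int))).toNat = i := by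
        injection hif
      have hti : tn = i + jn := by omega
      subst hti
      refine ⟨jn, hj, by omega, ?_⟩
      rw [List.getD_eq_getElem A 0 ht, List.getD_eq_getElem B 0 hj]
      exact hA
    · exact absurd hif (by simp)
  · rintro ⟨j, hj, hij, heq⟩
    refine ⟨((0 : Int) + (j : Int), B[j]'hj), ⟨j, hj, rfl⟩, ((i + j : Nat) : Int), ?_, ?_⟩
    · rw [mem_pos]
      refine ⟨i + j, hij, rfl, ?_⟩
      rw [List.getD_eq_getElem A 0 hij, List.getD_eq_getElem B 0 hj] at heq
      exact heq
    · simp only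
      rw [if_pos (by push_cast; omega)]
      congr 1
      push_cast
      omega

theorem portB_spec (A B : List Int) :
    correlation_finder_alt A B = (List.range A.length).map (cfSpec A B) := by
  rw [portB_flat]
  apply List.ext_getElem?
  intro i
  rw [foldl_set1_getElem?, List.length_replicate]
  by_cases hl : i < A.length
  · rw [List.getElem?_map, List.getElem?_range hl, List.getElem?_replicate, if_pos hl]
    by_cases hm : ∃ j < B.length, i + j < A.length ∧ A.getD (i + j) 0 = B.getD j 0
    · rw [if_pos ⟨(mem_cfW A B i).mpr hm, hl⟩]
      unfold cfSpec
      simp only [Option.map_some]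
      rw [if_pos hm]
    · rw [if_neg (fun h => hm ((mem_cfW A B i).mp h.1))]
      unfold cfSpec
      simp only [Option.map_some]
      rw [if_neg hm]
  · rw [if_neg (fun h => hl h.2)]
    rw [List.getElem?_eq_none (by simpa using hl), List.getElem?_eq_none (by simpa using hl)]

-- ===== VERDICT (by name: the statement is the Claim_ definition above) =====
theorem correlation_finder_spec : Claim_equal_correlation_finder := by
  intro A B _
  unfold Spec_correlation_finder
  rw [portA_spec, portB_spec]
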